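-- pv_equiv track=rewrite | github.com/min731/Algorithm_Problem_Solving | prg_2개 이하로 다른 비트/Main2.py | solution
-- ===== SOURCE A (Python) =====
-- def get_bin(x):
--     x = bin(x)[2:]
--
--     return x
--
-- def solution(numbers):
--     answer = []
--
--     for num in numbers:
--         # num = get_bin(num)
--
--         if num%2==0:
--             num = get_bin(num)
--             num = num[:-1] + '1'
--             answer.append(int(num,2))
--
--         else:
--             num = get_bin(num)
--             num = '0'+num
--             idx = num.rindex('0')
--             num = num[:idx]+'10'+num[idx+2:]
--             answer.append(int(num,2))
--
--     return answer
-- ===== SOURCE B (Python) =====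
-- def solution(numbers):
--     answer = []
--     for num in numbers:
--         if num % 2 == 0:
--             # binary of an even number (or 0) with last bit set to 1: just num + 1
--             answer.append(num + 1)
--         else:
--             # lowest set bit of num + 1; the '01' -> '10' rewrite adds half of it
--             low = (num + 1) & -(num + 1)
--             answer.append(num + low // 2)
--     return answer
-- ===== Notes on version B (the rewrite author's own statement) =====
-- stated objective: simpler
-- what changed: Replaces A's bin()/string-splice/rindex/int(,2) round-trip by pure integer arithmetic: even num maps to num+1, odd num to num + ((num+1) & -(num+1)) // 2 (half the lowest set bit of num+1); no string is built or scanned.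
-- outside the precondition, e.g. on solution([-1]): A returns [5], B returns [-1]; on solution([-3]): A returns [11], B returns [-2]; on solution([-2]): A raises ValueError, B returns [-1]
import Mathlib
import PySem

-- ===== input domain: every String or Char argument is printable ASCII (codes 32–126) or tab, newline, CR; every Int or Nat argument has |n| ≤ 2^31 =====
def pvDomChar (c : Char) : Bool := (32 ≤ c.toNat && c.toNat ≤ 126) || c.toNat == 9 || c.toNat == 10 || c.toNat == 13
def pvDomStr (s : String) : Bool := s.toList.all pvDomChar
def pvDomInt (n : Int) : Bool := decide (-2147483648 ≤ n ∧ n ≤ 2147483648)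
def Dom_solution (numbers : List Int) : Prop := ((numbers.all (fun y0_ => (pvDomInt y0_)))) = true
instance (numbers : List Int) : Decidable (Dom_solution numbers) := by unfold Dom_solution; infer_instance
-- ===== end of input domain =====

-- B replaces A's bin()/string-splice/int(,2) round-trip by plain integer arithmetic (even: num+1;
-- odd: num + half the lowest set bit of num+1); equal on lists of nonnegative ints (Pre_).

-- ===== PORT A =====
-- binDigits m = the binary digits of m, most significant first ([] for 0);
-- hand port of bin(x)[2:] (together with getBin below), exact for 0 ≤ x.
def binDigits (k : Nat) : List Char :=
  if h : k = 0 then []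
  else binDigits (k / 2) ++ [if k % 2 = 1 then '1' else '0']
decreasing_by exact Nat.div_lt_self (Nat.pos_of_ne_zero h) one_lt_two

-- get_bin(x) = bin(x)[2:]; exact for 0 ≤ x (negative x is outside Pre_solution).
def getBin (x : Int) : List Char := if x = 0 then ['0'] else binDigits x.toNat

-- int(s, 2), hand-ported; exact on the nonempty '0'/'1' strings this program feeds it.
def parseBin (s : List Char) : Int :=
  s.foldl (fun a c => 2 * a + (if c = '1' then 1 else 0)) 0

-- s.rindex('0'): index of the LAST '0'; exact whenever '0' occurs in s
-- (here s always starts with '0'; Python raises only when '0' is absent).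
def rindex0 (s : List Char) : Nat := s.length - 1 - s.reverse.findIdx (· == '0')

def solution (numbers : List Int) : List Int :=
  numbers.foldl (fun answer num =>
    if PySem.Int.mod num 2 = 0 then
      -- num = get_bin(num); num = num[:-1] + '1'; answer.append(int(num, 2))
      answer ++ [parseBin ((getBin num).dropLast ++ ['1'])]
    else
      -- num = '0' + get_bin(num); idx = num.rindex('0');
      -- num = num[:idx] + '10' + num[idx+2:]; answer.append(int(num, 2))
      let s := '0' :: getBin num
      let idx := rindex0 s
      answer ++ [parseBin (s.take idx ++ ['1', '0'] ++ s.drop (idx + 2))]) []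

-- ===== PORT B =====
def solution_alt (numbers : List Int) : List Int :=
  numbers.foldl (fun answer num =>
    if PySem.Int.mod num 2 = 0 then
      answer ++ [num + 1]
    else
      let low := PySem.Int.band (num + 1) (-(num + 1))
      answer ++ [num + PySem.Int.floordiv low 2]) []

-- ===== PRECONDITION & SPEC =====
-- Pre_ restricts inputs to nonnegative integers, the binary-transform task's natural domain: a
-- list with an even negative element makes A raise ValueError (bin()'s sign prefix reaches
-- int(.,2)), and on odd negative elements no particular value is specified by the task (A splices
-- the '-0b' sign prefix of bin() into the digit string; B's arithmetic gives another value).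
def Pre_solution (numbers : List Int) : Prop := ∀ n ∈ numbers, 0 ≤ n
instance (numbers : List Int) : Decidable (Pre_solution numbers) := by
  unfold Pre_solution; infer_instance

def pvWitness_solution : List Int := [0, 1, 2, 3, 12, 13, 2147483647]

def Spec_solution (numbers : List Int) (out : List Int) : Prop := out = solution_alt numbers
instance (numbers : List Int) (out : List Int) : Decidable (Spec_solution numbers out) := by
  unfold Spec_solution; infer_instance

-- ===== CLAIM (what is proved, stated in full; the proofs are below) =====
def Claim_equal_solution : Prop :=
  ∀ (numbers : List Int), Dom_solution numbers → Pre_solution numbers →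
    Spec_solution numbers (solution numbers)

-- ===== LEMMAS AND PROOFS =====

-- lowB m: the lowest set bit of m (0 for 0); proof-side description of (m & -m).
def lowB (k : Nat) : Nat :=
  if h : k = 0 then 0
  else if k % 2 = 1 then 1 else 2 * lowB (k / 2)
decreasing_by exact Nat.div_lt_self (Nat.pos_of_ne_zero h) one_lt_two

theorem binDigits_zero : binDigits 0 = [] := by rw [binDigits]; simp

theorem binDigits_pos (k : Nat) (h : k ≠ 0) :
    binDigits k = binDigits (k / 2) ++ [if k % 2 = 1 then '1' else '0'] := by
  rw [binDigits]; simp [h]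

theorem lowB_odd (k : Nat) (h : k % 2 = 1) : lowB k = 1 := by
  rw [lowB]; simp [h]; omega

theorem lowB_even (k : Nat) (h0 : k ≠ 0) (h : k % 2 = 0) : lowB k = 2 * lowB (k / 2) := by
  rw [lowB]; simp [h0, h]

theorem lowB_zero : lowB 0 = 0 := by rw [lowB]; simp

theorem lowB_le (k : Nat) : lowB k ≤ k := by
  induction k using Nat.strong_induction_on with
  | _ k ih =>
    by_cases h0 : k = 0
    · simp [h0, lowB_zero]
    by_cases h1 : k % 2 = 1
    · rw [lowB_odd k h1]; omega
    · rw [lowB_even k h0 (by omega)]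
      have := ih (k / 2) (Nat.div_lt_self (by omega) one_lt_two)
      omega

theorem parse_append_one (l : List Char) (c : Char) :
    parseBin (l ++ [c]) = 2 * parseBin l + (if c = '1' then 1 else 0) := by
  simp [parseBin, List.foldl_append]

theorem parse_cons_zero (l : List Char) : parseBin ('0' :: l) = parseBin l := by
  simp [parseBin]

theorem parse_binDigits (k : Nat) : parseBin (binDigits k) = k := by
  induction k using Nat.strong_induction_on with
  | _ k ih =>
    by_cases h0 : k = 0
    · simp [h0, binDigits_zero, parseBin]
    · rw [binDigits_pos k h0, parse_append_one,
        ih (k / 2) (Nat.div_lt_self (by omega) one_lt_two)]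
      rcases Nat.mod_two_eq_zero_or_one k with h1 | h1
      · simp [h1]; omega
      · simp [h1]; omega

-- m & (m-1) clears the lowest set bit
theorem land_pred (k : Nat) (h : k ≠ 0) : k &&& (k - 1) = k - lowB k := by
  induction k using Nat.strong_induction_on with
  | _ k ih =>
    rcases Nat.mod_two_eq_zero_or_one k with h1 | h1
    · obtain ⟨j, hj⟩ : ∃ j, k = 2 * j := ⟨k / 2, by omega⟩
      subst hj
      have hj0 : j ≠ 0 := by omega
      have hb := Nat.land_bit false j true (j - 1)
      simp [Nat.bit] at hb
      have h21 : 2 * (j - 1) + 1 = 2 * j - 1 := by omega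
      rw [h21] at hb
      rw [hb, ih j (by omega) hj0, lowB_even (2 * j) (by omega) (by omega)]
      have h22 : 2 * j / 2 = j := by omega
      rw [h22]
      have := lowB_le j
      omega
    · obtain ⟨j, hj⟩ : ∃ j, k = 2 * j + 1 := ⟨k / 2, by omega⟩
      subst hj
      have hb := Nat.land_bit true j false j
      simp [Nat.bit] at hb
      have h21 : 2 * j + 1 - 1 = 2 * j := by omega
      rw [h21, hb, lowB_odd (2 * j + 1) (by omega)]
      omega

theorem band_lowbit (k : Nat) (h : k ≠ 0) :
    PySem.Int.band (k : Int) (-(k : Int)) = (lowB k : Int) := by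
  have hk : 0 < k := Nat.pos_of_ne_zero h
  simp only [PySem.Int.band]
  rw [if_pos (by positivity), if_neg (by omega)]
  have h1 : ((k : Int)).toNat = k := Int.toNat_natCast k
  have h2 : (-(-(k : Int)) - 1).toNat = k - 1 := by omega
  rw [h1, h2, land_pred k h]
  have := lowB_le k
  omega

theorem rindex0_append_zero (l : List Char) : rindex0 (l ++ ['0']) = l.length := by
  simp [rindex0, List.findIdx_cons]

theorem rindex0_append_one (l : List Char) : rindex0 (l ++ ['1']) = rindex0 l := by
  simp [rindex0, List.findIdx_cons]
  omega

theorem getBin_natCast (m : Nat) (h : m ≠ 0) : getBin (m : Int) = binDigits m := by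
  simp [getBin, h]

theorem even_val (m : Nat) (h : m % 2 = 0) :
    parseBin ((getBin (m : Int)).dropLast ++ ['1']) = (m : Int) + 1 := by
  by_cases h0 : m = 0
  · subst h0; simp [getBin, parseBin]
  · rw [getBin_natCast m h0, binDigits_pos m h0]
    have hd : (if m % 2 = 1 then '1' else '0') = '0' := by simp [h]
    rw [hd, List.dropLast_concat, parse_append_one, parse_binDigits]
    simp
    omega

theorem odd_val : ∀ (m : Nat), m % 2 = 1 →
    parseBin (('0' :: getBin (m : Int)).take (rindex0 ('0' :: getBin (m : Int))) ++ ['1', '0'] ++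
      ('0' :: getBin (m : Int)).drop (rindex0 ('0' :: getBin (m : Int)) + 2))
    = (m : Int) + (lowB ((m + 1) / 2) : Int) := by
  intro m
  induction m using Nat.strong_induction_on with
  | _ m ih =>
    intro h
    have hm0 : m ≠ 0 := by omega
    have hbd : binDigits m = binDigits (m / 2) ++ ['1'] := by
      rw [binDigits_pos m hm0]; simp [h]
    have harr : '0' :: getBin (m : Int) = ('0' :: binDigits (m / 2)) ++ ['1'] := by
      rw [getBin_natCast m hm0, hbd]; simp
    rw [harr, rindex0_append_one]
    rcases Nat.eq_zero_or_pos (m / 2) with hk0 | hkpos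
    · -- m = 1: the string is "01" and becomes "10"
      have hm1 : m = 1 := by omega
      subst hm1
      norm_num [binDigits_zero, rindex0, List.findIdx_cons, parseBin,
        lowB_odd 1 (by norm_num)] <;> decide
    · rcases Nat.mod_two_eq_zero_or_one (m / 2) with hke | hko
      · -- m/2 even and positive: the last '0' is the second-to-last character
        have hbdk : binDigits (m / 2) = binDigits (m / 2 / 2) ++ ['0'] := by
          rw [binDigits_pos (m / 2) (by omega)]
          have hd : (if m / 2 % 2 = 1 then '1' else '0') = '0' := by simp [hke]
          rw [hd]
        have h1 : ('0' :: binDigits (m / 2)) = ('0' :: binDigits (m / 2 / 2)) ++ ['0'] := by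
          rw [hbdk]; rfl
        rw [h1, rindex0_append_zero]
        have h2 : (('0' :: binDigits (m / 2 / 2)) ++ ['0']) ++ ['1']
            = ('0' :: binDigits (m / 2 / 2)) ++ ['0', '1'] := by simp
        rw [h2, List.take_left, List.drop_eq_nil_of_le (by simp), List.append_nil]
        have h3 : ('0' :: binDigits (m / 2 / 2)) ++ ['1', '0']
            = (('0' :: binDigits (m / 2 / 2)) ++ ['1']) ++ ['0'] := by simp
        rw [h3, parse_append_one, parse_append_one, parse_cons_zero, parse_binDigits]
        have hlow : lowB ((m + 1) / 2) = 1 := lowB_odd _ (by omega)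
        rw [hlow]
        simp
        omega
      · -- m/2 odd: the rewrite happens inside '0' :: binDigits (m/2), before the final '1'
        have hbdk : binDigits (m / 2) = binDigits (m / 2 / 2) ++ ['1'] := by
          rw [binDigits_pos (m / 2) (by omega)]; simp [hko]
        have hj : 1 ≤ List.findIdx (· == '0') ('0' :: binDigits (m / 2)).reverse := by
          rw [hbdk]
          simp [List.findIdx_cons]
        have hlen : ('0' :: binDigits (m / 2)).length = (binDigits (m / 2 / 2)).length + 2 := by
          rw [hbdk]; simp
        have hidx : rindex0 ('0' :: binDigits (m / 2)) + 2 ≤ ('0' :: binDigits (m / 2)).length := by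
          unfold rindex0
          omega
        rw [List.take_append_of_le_length (by omega),
          List.drop_append_of_le_length (by omega)]
        have h4 : List.take (rindex0 ('0' :: binDigits (m / 2))) ('0' :: binDigits (m / 2)) ++
              ['1', '0'] ++
              (List.drop (rindex0 ('0' :: binDigits (m / 2)) + 2) ('0' :: binDigits (m / 2)) ++ ['1'])
            = (List.take (rindex0 ('0' :: binDigits (m / 2))) ('0' :: binDigits (m / 2)) ++
              ['1', '0'] ++
              List.drop (rindex0 ('0' :: binDigits (m / 2)) + 2) ('0' :: binDigits (m / 2))) ++ ['1'] := by
          simp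
        rw [h4, parse_append_one]
        have IH := ih (m / 2) (by omega) hko
        rw [getBin_natCast (m / 2) (by omega)] at IH
        rw [IH]
        have hlow : lowB ((m + 1) / 2) = 2 * lowB ((m / 2 + 1) / 2) := by
          have he : (m + 1) / 2 = m / 2 + 1 := by omega
          rw [he, lowB_even (m / 2 + 1) (by omega) (by omega)]
        rw [hlow]
        have hh : (m + 1) / 2 = m / 2 + 1 := by omega
        simp
        omega

theorem foldl_snoc {α β : Type} (step : List β → α → List β) (g : α → β)
    (h : ∀ a x, step a x = a ++ [g x]) (l : List α) (acc : List β) :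
    List.foldl step acc l = acc ++ l.map g := by
  induction l generalizing acc with
  | nil => simp
  | cons x xs ih => simp [h, ih, List.append_assoc]

-- per-element agreement on nonnegative input
-- per-element agreement on nonnegative input
theorem elem_eq (n : Int) (hn : 0 ≤ n) :
    (if PySem.Int.mod n 2 = 0 then
      parseBin ((getBin n).dropLast ++ ['1'])
    else
      parseBin (('0' :: getBin n).take (rindex0 ('0' :: getBin n)) ++ ['1', '0'] ++
        ('0' :: getBin n).drop (rindex0 ('0' :: getBin n) + 2)))
    = (if PySem.Int.mod n 2 = 0 then n + 1
       else n + PySem.Int.floordiv (PySem.Int.band (n + 1) (-(n + 1))) 2) := by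
  obtain ⟨m, rfl⟩ := Int.eq_ofNat_of_zero_le hn
  have hmod : PySem.Int.mod ((m : Nat) : Int) 2 = ((m % 2 : Nat) : Int) := by
    exact_mod_cast PySem.Int.mod_natCast m 2
  rcases Nat.mod_two_eq_zero_or_one m with he | ho
  · have hc : PySem.Int.mod ((m : Nat) : Int) 2 = 0 := by rw [hmod, he]; simp
    rw [if_pos hc, if_pos hc]
    exact even_val m he
  · have hc : ¬ PySem.Int.mod ((m : Nat) : Int) 2 = 0 := by rw [hmod, ho]; norm_num
    rw [if_neg hc, if_neg hc]
    have hb : ((m : Int) + 1) = ((m + 1 : Nat) : Int) := by push_cast; ring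
    rw [hb, band_lowbit (m + 1) (by omega)]
    have hf : PySem.Int.floordiv ((lowB (m + 1) : Nat) : Int) 2
        = ((lowB (m + 1) / 2 : Nat) : Int) := by
      exact_mod_cast PySem.Int.floordiv_natCast (lowB (m + 1)) 2
    rw [hf]
    have hl : lowB (m + 1) / 2 = lowB ((m + 1) / 2) := by
      rw [lowB_even (m + 1) (by omega) (by omega)]; omega
    rw [hl]
    exact odd_val m ho

-- ===== VERDICT (by name: the statement is the Claim_ definition above) =====
theorem solution_spec : Claim_equal_solution := by
  intro numbers _hdom hpre
  unfold Spec_solution solution solution_alt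
  rw [foldl_snoc _ (fun num => if PySem.Int.mod num 2 = 0 then
        parseBin ((getBin num).dropLast ++ ['1'])
      else
        parseBin (('0' :: getBin num).take (rindex0 ('0' :: getBin num)) ++ ['1', '0'] ++
          ('0' :: getBin num).drop (rindex0 ('0' :: getBin num) + 2)))
      (by
        intro a x
        by_cases h : PySem.Int.mod x 2 = 0
        · simp only [if_pos h]
        · simp only [if_neg h]),
    foldl_snoc _ (fun num => if PySem.Int.mod num 2 = 0 then num + 1
        else num + PySem.Int.floordiv (PySem.Int.band (num + 1) (-(num + 1))) 2)
      (by
        intro a x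
        by_cases h : PySem.Int.mod x 2 = 0
        · simp only [if_pos h]
        · simp only [if_neg h])]
  simp only [List.nil_append]
  exact List.map_congr_left (fun n hn => elem_eq n (hpre n hn))
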